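-- pv_equiv track=rewrite | github.com/yuanyehome/nlp-homework-1 | code/run.py | _gen_words
-- ===== SOURCE A (Python) =====
-- def _gen_words(sentence, labels):
--     """Generate the segmentation result from labels.
--     """
--     word = ""
--     words = []
--     for token, label in zip(sentence, labels):
--         word += token
--         if label in [1, 3]:
--             words.append(word)
--             word = ""
--     return words
-- ===== SOURCE B (Python) =====
-- def _gen_words(sentence, labels):
--     """Generate the segmentation result from labels."""
--     n = min(len(sentence), len(labels))
--     cuts = [i for i in range(n) if labels[i] in (1, 3)]
--     words = []
--     start = 0
--     for b in cuts:
--         words.append(sentence[start:b + 1])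
--         start = b + 1
--     return words
-- ===== Notes on version B (the rewrite author's own statement) =====
-- stated objective: alternative
-- what changed: Replaced the accumulate-and-flush buffer loop by a two-phase decomposition: first collect the boundary indices (labels 1 or 3 within the zip-truncated range), then slice the sentence between consecutive boundaries, naturally discarding the unflushed tail.
import Mathlib
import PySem

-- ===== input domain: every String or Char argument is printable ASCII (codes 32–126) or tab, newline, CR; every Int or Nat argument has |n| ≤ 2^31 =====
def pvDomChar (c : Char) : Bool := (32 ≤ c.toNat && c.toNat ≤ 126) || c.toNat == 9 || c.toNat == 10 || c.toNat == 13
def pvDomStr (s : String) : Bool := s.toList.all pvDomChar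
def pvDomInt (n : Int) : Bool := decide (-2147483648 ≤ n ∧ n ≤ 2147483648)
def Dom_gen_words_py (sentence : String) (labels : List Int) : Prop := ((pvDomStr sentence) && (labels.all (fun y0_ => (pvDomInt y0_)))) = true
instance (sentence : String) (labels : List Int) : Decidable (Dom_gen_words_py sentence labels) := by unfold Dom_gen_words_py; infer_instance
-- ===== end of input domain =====

-- B re-decomposes A's accumulate-and-flush loop into collect-boundary-indices-then-slice; same return value on all inputs (alternative decomposition, no speed claim).

-- ===== PORT A =====
-- A: one pass over zip(sentence, labels), growing a word buffer, flushing it on labels 1/3.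
def gen_words_py (sentence : String) (labels : List Int) : List String :=
  ((sentence.toList.zip labels).foldl
    (fun (st : String × List String) tl =>
      let word := st.1.push tl.1
      if tl.2 = 1 ∨ tl.2 = 3 then ("", st.2 ++ [word]) else (word, st.2))
    ("", [])).2

-- ===== PORT B =====
-- B: cuts = boundary indices over range (min len); then walk cuts slicing sentence[start:b+1].
-- sentence[start:b+1] with 0 ≤ start ≤ b+1 ≤ len is exactly (drop start).take (b+1-start);
-- labels[i] for 0 ≤ i < len labels is exactly labels.getD i 0.
def gen_words_py_alt (sentence : String) (labels : List Int) : List String :=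
  let cs := sentence.toList
  let n := min cs.length labels.length
  let cuts := (List.range n).filter (fun i => labels.getD i 0 == 1 || labels.getD i 0 == 3)
  (cuts.foldl
    (fun (st : Nat × List String) b =>
      (b + 1, st.2 ++ [String.ofList ((cs.drop st.1).take (b + 1 - st.1))]))
    (0, [])).2

-- ===== PRECONDITION & SPEC =====
def Spec_gen_words_py (sentence : String) (labels : List Int) (out : List String) : Prop := out = gen_words_py_alt sentence labels
instance (sentence : String) (labels : List Int) (out : List String) : Decidable (Spec_gen_words_py sentence labels out) := by unfold Spec_gen_words_py; infer_instance

-- ===== CLAIM (what is proved, stated in full; the proofs are below) =====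
def Claim_equal_gen_words_py : Prop := ∀ (sentence : String) (labels : List Int), Dom_gen_words_py sentence labels → Spec_gen_words_py sentence labels (gen_words_py sentence labels)

-- ===== LEMMAS AND PROOFS =====

-- Common specification: segmentation with a pending buffer.
def segSpec : List (Char × Int) → String → List String
  | [], _ => []
  | (c, l) :: rest, w =>
    if l = 1 ∨ l = 3 then (w.push c) :: segSpec rest "" else segSpec rest (w.push c)

lemma push_ofList (p : List Char) (c : Char) :
    (String.ofList p).push c = String.ofList (p ++ [c]) := by
  rw [String.push_eq_append, String.singleton_eq_ofList, ← String.ofList_append]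

-- A's fold flushes exactly segSpec, accumulating into ws.
lemma foldA_spec (z : List (Char × Int)) :
    ∀ (w : String) (ws : List String),
    (z.foldl
      (fun (st : String × List String) tl =>
        let word := st.1.push tl.1
        if tl.2 = 1 ∨ tl.2 = 3 then ("", st.2 ++ [word]) else (word, st.2))
      (w, ws)).2 = ws ++ segSpec z w := by
  induction z with
  | nil => intro w ws; simp [segSpec]
  | cons hd tl ih =>
    intro w ws
    obtain ⟨c, l⟩ := hd
    by_cases h : l = 1 ∨ l = 3 <;> simp [segSpec, h, ih]

def cutsOf (ls : List Int) (n : Nat) : List Nat :=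
  (List.range n).filter (fun i => ls.getD i 0 == 1 || ls.getD i 0 == 3)

def stepB (F : List Char) (st : Nat × List String) (b : Nat) : Nat × List String :=
  (b + 1, st.2 ++ [String.ofList ((F.drop st.1).take (b + 1 - st.1))])

lemma cuts_cons (l : Int) (ls : List Int) (n : Nat) :
    cutsOf (l :: ls) (n + 1)
      = (if l = 1 ∨ l = 3 then [0] else []) ++ (cutsOf ls n).map (· + 1) := by
  unfold cutsOf
  rw [List.range_succ_eq_map]
  by_cases h : l = 1 ∨ l = 3
  · rcases h with h | h <;>
      simp [h, List.filter_map, Function.comp_def]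
  · rw [not_or] at h
    simp [h.1, h.2, List.filter_map, Function.comp_def]

-- B's fold over the (shifted) cut indices produces segSpec of the remaining characters,
-- where p is the pending (consumed but unflushed) prefix: F.drop s = p ++ cs, start = s.
lemma foldB_spec (cs : List Char) : ∀ (ls : List Int) (F p : List Char) (s : Nat) (ws : List String),
    F.drop s = p ++ cs →
    (((cutsOf ls (min cs.length ls.length)).map (· + (s + p.length))).foldl (stepB F) (s, ws)).2
      = ws ++ segSpec (cs.zip ls) (String.ofList p) := by
  induction cs with
  | nil => intro ls F p s ws _; simp [cutsOf, segSpec]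
  | cons c cs ih =>
    intro ls F p s ws hF
    cases ls with
    | nil => simp [cutsOf, segSpec]
    | cons l ls =>
      have hmin : min (c :: cs).length (l :: ls).length = min cs.length ls.length + 1 := by
        simp [Nat.succ_min_succ]
      rw [hmin, cuts_cons]
      by_cases h : l = 1 ∨ l = 3
      · -- boundary: flush p ++ [c] and restart with an empty pending buffer
        rw [if_pos h]
        simp only [List.map_append, List.map_cons, List.map_nil, List.foldl_append,
          List.foldl_cons, List.foldl_nil, List.map_map, Nat.zero_add]
        have hstep : stepB F (s, ws) (s + p.length)
            = (s + p.length + 1, ws ++ [String.ofList (p ++ [c])]) := by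
          unfold stepB
          rw [hF]
          have ht : s + p.length + 1 - s = p.length + 1 := by omega
          rw [ht]
          rw [show p ++ c :: cs = p ++ ([c] ++ cs) from by simp, ← List.append_assoc]
          rw [show p.length + 1 = (p ++ [c]).length from by simp, List.take_left]
        rw [hstep]
        have hcomp : ((· + (s + p.length)) ∘ (· + 1) : Nat → Nat)
            = (· + (s + p.length + 1 + ([] : List Char).length)) := by
          funext x; simp only [Function.comp_apply, List.length_nil]; omega
        rw [hcomp]
        have hdrop : F.drop (s + p.length + 1) = [] ++ cs := by
          have h1 : F.drop (s + p.length + 1) = (F.drop s).drop (p.length + 1) := by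
            rw [List.drop_drop]; congr 1
          rw [h1, hF, show p ++ c :: cs = (p ++ [c]) ++ cs from by simp,
            show p.length + 1 = (p ++ [c]).length from by simp, List.drop_left]
          simp
        rw [ih ls F [] (s + p.length + 1) (ws ++ [String.ofList (p ++ [c])]) hdrop]
        simp [segSpec, h, push_ofList]
      · -- no boundary: extend the pending buffer with c
        rw [if_neg h]
        simp only [List.nil_append, List.map_map]
        have hcomp : ((· + (s + p.length)) ∘ (· + 1) : Nat → Nat)
            = (· + (s + (p ++ [c]).length)) := by
          funext x; simp [Function.comp]; omega
        rw [hcomp]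
        rw [ih ls F (p ++ [c]) s ws (by rw [hF]; simp)]
        simp [segSpec, h, push_ofList]

-- ===== VERDICT (by name: the statement is the Claim_ definition above) =====
theorem gen_words_py_spec : Claim_equal_gen_words_py := by
  intro sentence labels _
  unfold Spec_gen_words_py gen_words_py gen_words_py_alt
  have hB := foldB_spec sentence.toList labels sentence.toList [] 0 [] (by simp)
  simp only [List.length_nil, Nat.add_zero] at hB
  simp only [List.map_id'] at hB
  rw [foldA_spec]
  simp only [List.nil_append] at hB ⊢
  rw [show ("" : String) = String.ofList [] from rfl, ← hB]
  rfl
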